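-- pv_equiv track=rewrite | github.com/ISAQQSAI/PPSUC_Graduation_Project | scripts/export_word.py | replace_sequential_occurrences
-- ===== SOURCE A (Python) =====
-- def replace_sequential_occurrences(text: str, placeholder: str, replacements: list[str]) -> str:
--     start = 0
--     for replacement in replacements:
--         index = text.find(placeholder, start)
--         if index == -1:
--             break
--         text = text[:index] + replacement + text[index + len(placeholder) :]
--         start = index + len(replacement)
--     return text
-- ===== SOURCE B (Python) =====
-- def replace_sequential_occurrences(text: str, placeholder: str, replacements: list[str]) -> str:
--     # Cut at the first len(replacements) placeholder occurrences, then
--     # interleave the segments with the replacements (raises ValueError on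
--     # an empty placeholder, which Pre_ excludes).
--     parts = text.split(placeholder, len(replacements))
--     out = parts[0]
--     for replacement, segment in zip(replacements, parts[1:]):
--         out += replacement + segment
--     return out
-- ===== Notes on version B (the rewrite author's own statement) =====
-- stated objective: idiomatic
-- what changed: Replaces A's find/slice/reassemble loop that rewrites the whole string each iteration with one str.split(placeholder, len(replacements)) call followed by interleaving segments and replacements; Pre_ excludes the empty placeholder, on which A's insert-at-cursor behaviour is accidental and B's str.split raises ValueError.
-- outside the precondition, e.g. on replace_sequential_occurrences('ab', '', ['X', 'Y']): A returns 'XYab', B raises ValueError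
import Mathlib
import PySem

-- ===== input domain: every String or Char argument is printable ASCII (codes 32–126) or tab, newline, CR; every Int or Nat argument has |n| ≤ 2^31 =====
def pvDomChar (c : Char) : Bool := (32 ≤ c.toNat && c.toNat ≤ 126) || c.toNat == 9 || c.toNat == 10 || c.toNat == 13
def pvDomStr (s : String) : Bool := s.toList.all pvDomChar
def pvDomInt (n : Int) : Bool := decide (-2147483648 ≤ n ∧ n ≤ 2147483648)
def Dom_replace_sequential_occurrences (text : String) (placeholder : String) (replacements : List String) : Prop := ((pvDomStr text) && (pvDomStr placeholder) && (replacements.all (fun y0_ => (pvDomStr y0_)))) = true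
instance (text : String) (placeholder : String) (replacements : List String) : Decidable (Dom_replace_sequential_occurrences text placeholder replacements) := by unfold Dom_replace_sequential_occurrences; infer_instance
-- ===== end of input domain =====

-- B replaces A's find/slice/rebuild loop with one split-at-placeholder followed by
-- interleaving the segments with the replacements (idiomatic decomposition);
-- Pre_ excludes the empty placeholder, on which B's str.split raises ValueError.

-- ===== PORT A =====
-- A's loop: state (text, start); each iteration finds the placeholder from `start`,
-- splices the replacement in, and moves `start` past it; `break` returns text.
def replAuxA (placeholder : String) : List String → String → Int → String
  | [], text, _ => text
  | replacement :: rest, text, start =>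
    let index := PySem.Str.findFrom text placeholder start
    if index = -1 then text
    else replAuxA placeholder rest
      (PySem.Str.slice text none (some index) ++ replacement ++
        PySem.Str.slice text (some (index + PySem.Str.len placeholder)) none)
      (index + PySem.Str.len replacement)

def replace_sequential_occurrences (text : String) (placeholder : String) (replacements : List String) : String :=
  replAuxA placeholder replacements text 0

-- ===== PORT B =====
-- Source B: parts = text.split(placeholder, len(replacements)); out = parts[0];
-- for replacement, segment in zip(replacements, parts[1:]): out += replacement + segment
def replace_sequential_occurrences_alt (text : String) (placeholder : String) (replacements : List String) : String :=
  match PySem.Str.splitMax? text placeholder (replacements.length : Int) with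
  | none => ""            -- Python raises ValueError here (placeholder = ""); excluded by Pre_
  | some [] => ""         -- unreachable: str.split never returns an empty list
  | some (p :: ps) =>
      (replacements.zip ps).foldl (fun out rs => out ++ rs.1 ++ rs.2) p

-- ===== PRECONDITION & SPEC =====
-- Pre_ excludes placeholder = "": A then returns a value (it inserts the replacements at
-- successive cursor positions, an artefact of str.find('') returning the cursor), while
-- B's str.split raises ValueError on an empty separator.
def Pre_replace_sequential_occurrences (text : String) (placeholder : String) (replacements : List String) : Prop :=
  placeholder ≠ ""
instance (text : String) (placeholder : String) (replacements : List String) : Decidable (Pre_replace_sequential_occurrences text placeholder replacements) := by unfold Pre_replace_sequential_occurrences; infer_instance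

def pvWitness_replace_sequential_occurrences : String × String × List String :=
  ("abcabc", "b", ["X", "Y"])

def Spec_replace_sequential_occurrences (text : String) (placeholder : String) (replacements : List String) (out : String) : Prop := out = replace_sequential_occurrences_alt text placeholder replacements
instance (text : String) (placeholder : String) (replacements : List String) (out : String) : Decidable (Spec_replace_sequential_occurrences text placeholder replacements out) := by unfold Spec_replace_sequential_occurrences; infer_instance

-- ===== CLAIM (what is proved, stated in full; the proofs are below) =====
def Claim_equal_replace_sequential_occurrences : Prop := ∀ (text : String) (placeholder : String) (replacements : List String), Dom_replace_sequential_occurrences text placeholder replacements → Pre_replace_sequential_occurrences text placeholder replacements → Spec_replace_sequential_occurrences text placeholder replacements (replace_sequential_occurrences text placeholder replacements)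

-- ===== LEMMAS AND PROOFS =====

-- reference splitter: cut `l` at its first `m` occurrences of `sep` (sep ≠ [])
def splitF (sep : List Char) : List Char → Nat → List (List Char)
  | l, 0 => [l]
  | l, (m+1) =>
      let i := PySem.Chars.find l sep
      if i = -1 then [l]
      else l.take i.toNat :: splitF sep (l.drop (i.toNat + sep.length)) m

-- interleave: segments after the head, alternated with replacements
def interZip : List String → List (List Char) → List Char
  | r :: rs, q :: qs => r.toList ++ q ++ interZip rs qs
  | _, _ => []

def inter (reps : List String) : List (List Char) → List Char
  | [] => []
  | p :: ps => p ++ interZip reps ps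

def consHd (pre : List Char) : List (List Char) → List (List Char)
  | [] => [pre]
  | p :: ps => (pre ++ p) :: ps

lemma splitF_ne_nil (sep l : List Char) (m : Nat) : splitF sep l m ≠ [] := by
  cases m with
  | zero => simp [splitF]
  | succ n => simp only [splitF]; split <;> simp

lemma find_go_cons (sub : List Char) (c : Char) (t : List Char) (k : Nat) :
    PySem.Chars.find.go sub (c :: t) k =
      if sub.isPrefixOf (c :: t) then (k : Int) else PySem.Chars.find.go sub t (k+1) := by
  simp [PySem.Chars.find.go]

lemma find_go_nil (sub : List Char) (k : Nat) :
    PySem.Chars.find.go sub [] k = if sub.isEmpty then (k : Int) else -1 := by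
  simp [PySem.Chars.find.go]

lemma find_go_ge (sub l : List Char) : ∀ k : Nat,
    PySem.Chars.find.go sub l k = -1 ∨ (k : Int) ≤ PySem.Chars.find.go sub l k := by
  induction l with
  | nil =>
    intro k; rw [find_go_nil]
    by_cases h : sub.isEmpty <;> simp [h]
  | cons c t ih =>
    intro k; rw [find_go_cons]
    by_cases h : sub.isPrefixOf (c :: t)
    · simp [h]
    · simp only [h, if_false]
      rcases ih (k+1) with h0 | h0
      · exact Or.inl h0
      · right; push_cast at h0 ⊢; omega

lemma find_go_shift (sub l : List Char) : ∀ k : Nat,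
    PySem.Chars.find.go sub l k =
      if PySem.Chars.find.go sub l 0 = -1 then -1 else PySem.Chars.find.go sub l 0 + k := by
  induction l with
  | nil =>
    intro k; rw [find_go_nil, find_go_nil]
    by_cases h : sub.isEmpty <;> simp [h]
  | cons c t ih =>
    intro k
    rw [find_go_cons, find_go_cons]
    by_cases h : sub.isPrefixOf (c :: t)
    · simp [h]
    · simp only [h, if_false]
      rw [ih (k+1), ih 1]
      rcases find_go_ge sub t 0 with hg | hg
      · simp [hg]
      · split_ifs <;> push_cast at * <;> omega

lemma find_cons (sep : List Char) (c : Char) (t : List Char) :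
    PySem.Chars.find (c :: t) sep =
      if sep.isPrefixOf (c :: t) then 0
      else if PySem.Chars.find t sep = -1 then -1 else PySem.Chars.find t sep + 1 := by
  show PySem.Chars.find.go sep (c :: t) 0 = _
  rw [find_go_cons]
  by_cases h : sep.isPrefixOf (c :: t)
  · simp [h]
  · simp only [h, if_false]
    rw [find_go_shift sep t 1]
    show _ = if PySem.Chars.find.go sep t 0 = -1 then -1 else PySem.Chars.find.go sep t 0 + 1
    norm_cast

lemma find_nil' (sep : List Char) (hsep : sep ≠ []) : PySem.Chars.find [] sep = -1 := by
  show PySem.Chars.find.go sep [] 0 = -1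
  rw [find_go_nil]
  simp [List.isEmpty_iff, hsep]

lemma go_spec (sep : List Char) (hsep : sep ≠ []) : ∀ (fuel : Nat) (l cur : List Char) (acc : List (List Char)) (m : Nat),
    l.length < fuel →
    PySem.Chars.splitOnMax.go sep fuel m l cur acc = acc.reverse ++ consHd cur.reverse (splitF sep l m) := by
  intro fuel
  induction fuel with
  | zero => intro l cur acc m h; exact absurd h (by omega)
  | succ f ih =>
    intro l cur acc m h
    cases l with
    | nil =>
      cases m with
      | zero => simp [PySem.Chars.splitOnMax.go, splitF, consHd]
      | succ m' => simp [PySem.Chars.splitOnMax.go, splitF, consHd, find_nil' sep hsep]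
    | cons c t =>
      have hsl : 0 < sep.length := List.length_pos_iff.mpr hsep
      cases m with
      | zero => simp [PySem.Chars.splitOnMax.go, splitF, consHd]
      | succ m' =>
        by_cases hp : sep.isPrefixOf (c :: t)
        · have hstep : PySem.Chars.splitOnMax.go sep (f+1) (m'+1) (c :: t) cur acc
              = PySem.Chars.splitOnMax.go sep f m' ((c :: t).drop sep.length) [] (cur.reverse :: acc) := by
            simp [PySem.Chars.splitOnMax.go, hp]
          rw [hstep, ih _ _ _ _ (by simp at h ⊢; omega)]
          have hfind : PySem.Chars.find (c :: t) sep = 0 := by rw [find_cons]; simp [hp]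
          obtain ⟨p, ps, hps⟩ := List.exists_cons_of_ne_nil (splitF_ne_nil sep ((c :: t).drop sep.length) m')
          simp [splitF, hfind, hps, consHd]
        · have hstep : PySem.Chars.splitOnMax.go sep (f+1) (m'+1) (c :: t) cur acc
              = PySem.Chars.splitOnMax.go sep f (m'+1) t (c :: cur) acc := by
            simp [PySem.Chars.splitOnMax.go, hp]
          rw [hstep, ih _ _ _ _ (by simp at h ⊢; omega)]
          rcases eq_or_ne (PySem.Chars.find t sep) (-1) with hf | hf
          · have hfind : PySem.Chars.find (c :: t) sep = -1 := by rw [find_cons]; simp [hp, hf]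
            simp [splitF, hfind, hf, consHd]
          · have h0 : 0 ≤ PySem.Chars.find t sep := by
              have := PySem.Chars.neg_one_le_find t sep; omega
            have hfind : PySem.Chars.find (c :: t) sep = PySem.Chars.find t sep + 1 := by
              rw [find_cons]; simp [hp, hf]
            have hne : PySem.Chars.find (c :: t) sep ≠ -1 := by omega
            have htn : (PySem.Chars.find (c :: t) sep).toNat = (PySem.Chars.find t sep).toNat + 1 := by omega
            simp only [splitF, hf, if_false, hne, if_false, htn]
            simp [consHd, List.drop_succ_cons, List.take_succ_cons, Nat.add_right_comm]

lemma splitOnMax_eq (sep : List Char) (hsep : sep ≠ []) (s : List Char) (n : Nat) :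
    PySem.Chars.splitOnMax s sep (n : Int) = splitF sep s n := by
  rw [PySem.Chars.splitOnMax]
  have hneg : ¬ ((n : Int) < 0) := by omega
  obtain ⟨p, ps, hps⟩ := List.exists_cons_of_ne_nil (splitF_ne_nil sep s n)
  rw [if_neg hneg, go_spec sep hsep (s.length + 1) s [] [] (n : Int).toNat (by omega)]
  simp [hps, consHd]

lemma mainA (ph : String) (hsep : ph.toList ≠ []) : ∀ (reps : List String) (out rest : List Char),
    replAuxA ph reps (String.ofList (out ++ rest)) (out.length : Int)
      = String.ofList (out ++ inter reps (splitF ph.toList rest reps.length)) := by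
  intro reps
  induction reps with
  | nil => intro out rest; simp [replAuxA, splitF, inter, interZip]
  | cons r rs ih =>
    intro out rest
    simp only [replAuxA]
    have hidx : PySem.Str.findFrom (String.ofList (out ++ rest)) ph ((out.length : Nat) : Int) =
        if PySem.Chars.find rest ph.toList = -1 then -1
        else (out.length : Int) + PySem.Chars.find rest ph.toList := by
      rw [PySem.Str.findFrom_eq]
      simp only [String.toList_ofList]
      rw [PySem.Chars.findFrom_natCast _ _ out.length (by simp), List.drop_left]
    rcases eq_or_ne (PySem.Chars.find rest ph.toList) (-1) with hf | hf
    · rw [hidx, if_pos hf]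
      simp [splitF, hf, inter, interZip]
    · have h0 : 0 ≤ PySem.Chars.find rest ph.toList := by
        have := PySem.Chars.neg_one_le_find rest ph.toList; omega
      set i := (PySem.Chars.find rest ph.toList).toNat with hi
      have hfind : PySem.Chars.find rest ph.toList = (i : Int) := by omega
      have hile : i ≤ rest.length := by
        have := PySem.Chars.find_le_length rest ph.toList; omega
      have hne : (out.length : Int) + PySem.Chars.find rest ph.toList ≠ -1 := by omega
      rw [hidx, if_neg hf]
      simp only [hne, if_neg, if_false, reduceIte]
      have e1 : (out.length : Int) + PySem.Chars.find rest ph.toList = ((out.length + i : Nat) : Int) := by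
        push_cast; omega
      have e2 : (out.length : Int) + PySem.Chars.find rest ph.toList + PySem.Str.len ph
          = ((out.length + i + ph.toList.length : Nat) : Int) := by
        rw [PySem.Str.len]; push_cast; omega
      have htext : PySem.Str.slice (String.ofList (out ++ rest)) none
            (some ((out.length : Int) + PySem.Chars.find rest ph.toList)) ++ r ++
          PySem.Str.slice (String.ofList (out ++ rest))
            (some ((out.length : Int) + PySem.Chars.find rest ph.toList + PySem.Str.len ph)) none
          = String.ofList ((out ++ rest.take i ++ r.toList) ++ rest.drop (i + ph.toList.length)) := by
        rw [← String.toList_inj]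
        simp only [String.toList_append, PySem.Str.toList_slice, PySem.Chars.slice_eq_listSlice,
          String.toList_ofList]
        rw [e2, e1, PySem.List.slice_to_natCast, PySem.List.slice_from_natCast,
          List.take_append, List.drop_append]
        simp [List.take_of_length_le, List.drop_of_length_le, hile, Nat.add_right_comm]
        rw [List.drop_eq_nil_of_le (by omega)]
        simp only [List.nil_append]
        congr 1
        omega
      have hstart : (out.length : Int) + PySem.Chars.find rest ph.toList + PySem.Str.len r
          = (((out ++ rest.take i ++ r.toList).length : Nat) : Int) := by
        rw [PySem.Str.len]; push_cast
        simp [List.length_take, min_eq_left hile]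
        omega
      rw [htext, hstart, ih (out ++ rest.take i ++ r.toList) (rest.drop (i + ph.toList.length))]
      obtain ⟨p, ps, hps⟩ := List.exists_cons_of_ne_nil
        (splitF_ne_nil ph.toList (rest.drop (i + ph.toList.length)) rs.length)
      have hsplit : splitF ph.toList rest (r :: rs).length
          = rest.take i :: splitF ph.toList (rest.drop (i + ph.toList.length)) rs.length := by
        simp [splitF, hf, hfind]
      simp only [String.length_toList] at hps
      rw [← String.toList_inj]
      simp only [List.length_cons, String.length_toList] at hsplit
      simp [hsplit, hps, inter, interZip]

lemma mainB (reps : List String) : ∀ (p : List Char) (ps : List (List Char)),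
    (reps.zip (ps.map String.ofList)).foldl (fun out rs => out ++ rs.1 ++ rs.2) (String.ofList p)
      = String.ofList (p ++ interZip reps ps) := by
  induction reps with
  | nil => intro p ps; simp [interZip]
  | cons r rs ih =>
    intro p ps
    cases ps with
    | nil => simp [interZip]
    | cons q qs =>
      simp only [List.map_cons, List.zip_cons_cons, List.foldl_cons]
      have e : String.ofList p ++ r ++ String.ofList q = String.ofList (p ++ r.toList ++ q) := by
        rw [← String.toList_inj]; simp
      rw [e, ih]
      rw [← String.toList_inj]; simp [interZip]

-- ===== VERDICT (by name: the statement is the Claim_ definition above) =====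
theorem replace_sequential_occurrences_spec : Claim_equal_replace_sequential_occurrences := by
  intro text ph reps _hDom hPre
  unfold Spec_replace_sequential_occurrences
  have hsep : ph.toList ≠ [] := by
    simpa [String.toList_eq_nil_iff] using hPre
  obtain ⟨p, ps, hps⟩ := List.exists_cons_of_ne_nil (splitF_ne_nil ph.toList text.toList reps.length)
  -- A side
  have hA : replace_sequential_occurrences text ph reps
      = String.ofList (inter reps (splitF ph.toList text.toList reps.length)) := by
    unfold replace_sequential_occurrences
    have := mainA ph hsep reps [] text.toList
    simpa using this
  -- B side
  have hB : replace_sequential_occurrences_alt text ph reps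
      = String.ofList (inter reps (splitF ph.toList text.toList reps.length)) := by
    unfold replace_sequential_occurrences_alt
    have hsplit : PySem.Str.splitMax? text ph ((reps.length : Nat) : Int)
        = some ((splitF ph.toList text.toList reps.length).map String.ofList) := by
      rw [PySem.Str.splitMax?, PySem.Chars.splitMax?]
      simp only [List.isEmpty_iff, hsep, if_false]
      rw [splitOnMax_eq ph.toList hsep text.toList reps.length]
      simp
    rw [hsplit, hps]
    simp only [List.map_cons]
    rw [mainB reps p ps]
    simp [inter]
  rw [hA, hB]
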